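-- pv_equiv track=rewrite | github.com/eliottcassidy2000/math | 04-computation/three_disjoint_3cycles.py | find_directed_3cycles
-- ===== SOURCE A (Python) =====
-- def find_directed_3cycles(A, n):
--     """Find all directed 3-cycles (rotation-normalized)."""
--     cycles = set()
--     for i in range(n):
--         for j in range(n):
--             if j == i or not A[i][j]:
--                 continue
--             for k in range(n):
--                 if k == i or k == j or not A[j][k]:
--                     continue
--                 if A[k][i]:
--                     c = (i, j, k)
--                     min_idx = c.index(min(c))
--                     cycles.add(c[min_idx:] + c[:min_idx])
--     return list(cycles)
-- ===== SOURCE B (Python) =====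
-- def find_directed_3cycles(A, n):
--     """Find all directed 3-cycles (rotation-normalized)."""
--     cycles = []
--     for a in range(n):
--         for b in range(a + 1, n):
--             if not A[a][b]:
--                 continue
--             for c in range(a + 1, n):
--                 if c != b and A[b][c] and A[c][a]:
--                     cycles.append((a, b, c))
--     return cycles
-- ===== Notes on version B (the rewrite author's own statement) =====
-- stated objective: faster
-- what changed: B enumerates only canonical representatives (a, b, c) with a < b and a < c directly, appending each directed 3-cycle exactly once, instead of visiting all n^3 rotations, min/index-normalizing each tuple and deduplicating through a set.
import Mathlib
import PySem

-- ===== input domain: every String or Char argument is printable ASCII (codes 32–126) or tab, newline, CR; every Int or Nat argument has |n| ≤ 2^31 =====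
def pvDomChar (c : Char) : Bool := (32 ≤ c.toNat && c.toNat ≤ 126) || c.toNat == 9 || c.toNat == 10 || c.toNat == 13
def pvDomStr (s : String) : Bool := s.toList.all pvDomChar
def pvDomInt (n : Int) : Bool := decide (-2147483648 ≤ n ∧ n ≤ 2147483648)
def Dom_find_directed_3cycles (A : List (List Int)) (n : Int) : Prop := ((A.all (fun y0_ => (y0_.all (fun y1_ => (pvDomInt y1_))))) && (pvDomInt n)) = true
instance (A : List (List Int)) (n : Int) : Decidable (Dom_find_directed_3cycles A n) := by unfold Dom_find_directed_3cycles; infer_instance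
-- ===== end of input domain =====

-- B enumerates each directed 3-cycle once, as its canonical representative (a,b,c) with a < b and
-- a < c, by direct append — no set, no min/index rotation — intended as a constant-factor speedup
-- (~1/3 of the triples visited, no per-cycle normalization/deduplication).
-- Output-order note: Python A returns list(set(...)) whose order is CPython hash order; outputs are
-- compared as sets (ret_compare = set), and the Lean ports agree as lists (insertion order).

-- ===== PORT A =====
def find_directed_3cycles (A : List (List Int)) (n : Int) : List (Int × Int × Int) :=
  let cycles : PySem.Set (Int × Int × Int) :=
    (PySem.List.pyRange 0 n 1).foldl (fun s i =>
      (PySem.List.pyRange 0 n 1).foldl (fun s j =>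
        if j == i || PySem.List.pyGetD (PySem.List.pyGetD A i []) j 0 == 0 then s
        else
          (PySem.List.pyRange 0 n 1).foldl (fun s k =>
            if k == i || k == j || PySem.List.pyGetD (PySem.List.pyGetD A j []) k 0 == 0 then s
            else if PySem.List.pyGetD (PySem.List.pyGetD A k []) i 0 != 0 then
              -- c = (i, j, k); min_idx = c.index(min(c)); add c[min_idx:] + c[:min_idx]
              let c : List Int := [i, j, k]
              let min_idx : Nat := (PySem.List.index? c ((PySem.List.min? c (fun x => x)).getD 0)).getD 0
              match PySem.List.slice c (some (min_idx : Int)) none ++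
                    PySem.List.slice c none (some (min_idx : Int)) with
              | [x, y, z] => PySem.Set.add s (x, y, z)
              | _ => s
            else s) s) s) PySem.Set.empty
  cycles

-- ===== PORT B =====
def find_directed_3cycles_alt (A : List (List Int)) (n : Int) : List (Int × Int × Int) :=
  (PySem.List.pyRange 0 n 1).foldl (fun acc a =>
    (PySem.List.pyRange (a + 1) n 1).foldl (fun acc b =>
      if PySem.List.pyGetD (PySem.List.pyGetD A a []) b 0 == 0 then acc
      else
        (PySem.List.pyRange (a + 1) n 1).foldl (fun acc c =>
          if c != b && PySem.List.pyGetD (PySem.List.pyGetD A b []) c 0 != 0 &&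
              PySem.List.pyGetD (PySem.List.pyGetD A c []) a 0 != 0 then
            acc ++ [(a, b, c)]
          else acc) acc) acc) []

-- ===== PRECONDITION & SPEC =====
-- Pre_ excludes exactly the inputs on which Python A raises IndexError: n ≥ 2 with fewer than n
-- rows, or one of the first n rows shorter than n (for n ≤ 1 no subscript is ever evaluated).
def Pre_find_directed_3cycles (A : List (List Int)) (n : Int) : Prop :=
  2 ≤ n → (n ≤ (A.length : Int) ∧ ∀ row ∈ A.take n.toNat, n ≤ (row.length : Int))
instance (A : List (List Int)) (n : Int) : Decidable (Pre_find_directed_3cycles A n) := by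
  unfold Pre_find_directed_3cycles; infer_instance

def pvWitness_find_directed_3cycles : List (List Int) × Int := ([[0, 1, 0], [0, 0, 1], [1, 0, 0]], 3)

def Spec_find_directed_3cycles (A : List (List Int)) (n : Int) (out : List (Int × Int × Int)) : Prop :=
  out = find_directed_3cycles_alt A n
instance (A : List (List Int)) (n : Int) (out : List (Int × Int × Int)) :
    Decidable (Spec_find_directed_3cycles A n out) := by
  unfold Spec_find_directed_3cycles; infer_instance

-- ===== CLAIM (what is proved, stated in full; the proofs are below) =====
def Claim_equal_find_directed_3cycles : Prop := ∀ (A : List (List Int)) (n : Int), Dom_find_directed_3cycles A n → Pre_find_directed_3cycles A n → Spec_find_directed_3cycles A n (find_directed_3cycles A n)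

-- ===== LEMMAS AND PROOFS =====

-- edge test A[x][y] ≠ 0 (totalized lookup, as both ports use)
def pvE (A : List (List Int)) (x y : Int) : Bool :=
  PySem.List.pyGetD (PySem.List.pyGetD A x []) y 0 != 0

-- the inner-loop guard of A, k-dependent part
def pvKfilt (A : List (List Int)) (i j k : Int) : Bool :=
  !(k == i) && !(k == j) && pvE A j k && pvE A k i

-- the full guard of A's triple loop
def pvGuard (A : List (List Int)) (t : Int × Int × Int) : Bool :=
  (!(t.2.1 == t.1) && pvE A t.1 t.2.1) && pvKfilt A t.1 t.2.1 t.2.2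

-- rotation of a triple putting the minimum first (what A's min/index/slice dance computes)
def pvNorm (t : Int × Int × Int) : Int × Int × Int :=
  if t.1 < t.2.1 ∧ t.1 < t.2.2 then t
  else if t.2.1 < t.2.2 then (t.2.1, t.2.2, t.1)
  else (t.2.2, t.1, t.2.1)

-- all triples (i, j, k) with components in range(n), in A's enumeration (lex) order
def pvT (n : Int) : List (Int × Int × Int) :=
  (PySem.List.pyRange 0 n 1).flatMap (fun i =>
    (PySem.List.pyRange 0 n 1).flatMap (fun j =>
      (PySem.List.pyRange 0 n 1).map (fun k => (i, j, k))))

def pvLA (A : List (List Int)) (n : Int) : List (Int × Int × Int) :=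
  ((pvT n).filter (pvGuard A)).map pvNorm

def pvLB (A : List (List Int)) (n : Int) : List (Int × Int × Int) :=
  (pvT n).filter (fun t => pvGuard A t && decide (t.1 < t.2.1) && decide (t.1 < t.2.2))

-- strict lexicographic order on triples
def pvLt3 (x y : Int × Int × Int) : Prop :=
  x.1 < y.1 ∨ (x.1 = y.1 ∧ (x.2.1 < y.2.1 ∨ (x.2.1 = y.2.1 ∧ x.2.2 < y.2.2)))

lemma pvLt3_asymm (a b : Int × Int × Int) : pvLt3 a b → pvLt3 b a → False := by
  unfold pvLt3; omega

-- ---------- generic Set/foldl lemmas ----------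
lemma pvSet_mem_add {α : Type} [BEq α] [LawfulBEq α] (s : PySem.Set α) (x y : α) (h : x ∈ s) :
    x ∈ PySem.Set.add s y := by
  unfold PySem.Set.add
  split <;> simp [h]

lemma pvFoldl_add_filter_ne {α : Type} [BEq α] [LawfulBEq α] (x : α) :
    ∀ (ys : List α) (s : PySem.Set α), x ∈ s →
      ys.foldl PySem.Set.add s = (ys.filter (fun y => y != x)).foldl PySem.Set.add s := by
  intro ys
  induction ys with
  | nil => intro s _; rfl
  | cons y ys ih =>
      intro s hx
      by_cases hyx : y == x
      · have hy : y = x := by simpa using hyx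
        subst hy
        have hadd : PySem.Set.add s y = s := by
          simp only [PySem.Set.add, PySem.Set.contains]
          simp [hx]
        simp only [List.filter_cons, bne_self_eq_false, List.foldl_cons]
        rw [hadd]
        exact ih s hx
      · have hne : (y != x) = true := by simpa [bne] using hyx
        simp only [List.filter_cons, hne, List.foldl_cons]
        exact ih (PySem.Set.add s y) (pvSet_mem_add s x y hx)

lemma pvFoldl_add_cons {α : Type} [BEq α] [LawfulBEq α] (x : α) :
    ∀ (ys : List α) (s : List α), (∀ y ∈ ys, (y == x) = false) →
      ys.foldl PySem.Set.add (x :: s) = x :: ys.foldl PySem.Set.add s := by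
  intro ys
  induction ys with
  | nil => intro s _; rfl
  | cons y ys ih =>
      intro s hall
      have hy : (y == x) = false := hall y (by simp)
      have hadd : PySem.Set.add (x :: s) y = x :: PySem.Set.add s y := by
        unfold PySem.Set.add
        have hxy : ¬ (y = x) := by intro h; subst h; simp at hy
        have hco : PySem.Set.contains (x :: s) y = PySem.Set.contains s y := by
          simp [PySem.Set.contains, List.contains_cons, hxy]
        rw [hco]
        split <;> simp
      simp only [List.foldl_cons, hadd]
      exact ih (PySem.Set.add s y) (fun z hz => hall z (by simp [hz]))

lemma pvOfList_cons {α : Type} [BEq α] [LawfulBEq α] (x : α) (xs : List α) :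
    PySem.Set.ofList (x :: xs) = x :: PySem.Set.ofList (xs.filter (fun y => y != x)) := by
  have h1 : PySem.Set.ofList (x :: xs) = xs.foldl PySem.Set.add [x] := by
    simp [PySem.Set.ofList, PySem.Set.add, PySem.Set.empty, PySem.Set.contains]
  rw [h1, pvFoldl_add_filter_ne x xs [x] (by simp)]
  rw [pvFoldl_add_cons x (xs.filter (fun y => y != x)) []
    (by intro y hy; have := (List.mem_filter.mp hy).2; simpa [bne] using this)]
  rfl

lemma pvDedup_cons {α : Type} [BEq α] [LawfulBEq α] (x : α) (xs : List α) :
    PySem.List.dedup (x :: xs) = x :: PySem.List.dedup (xs.filter (fun y => y != x)) := by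
  simp only [PySem.List.dedup_eq_ofList]
  exact pvOfList_cons x xs

-- dedup of (map f m) when m is strictly sorted, f maps into m, is idempotent, and decreases
lemma pvDedupMap {α : Type} [DecidableEq α] [BEq α] [LawfulBEq α]
    (r : α → α → Prop) (hasym : ∀ a b, r a b → r b a → False) (f : α → α) :
    ∀ (N : Nat) (m : List α), m.length ≤ N → m.Pairwise r →
      (∀ t ∈ m, f t ∈ m) → (∀ t ∈ m, f (f t) = f t) → (∀ t ∈ m, f t ≠ t → r (f t) t) →
      PySem.List.dedup (m.map f) = m.filter (fun t => f t == t) := by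
  intro N
  induction N with
  | zero =>
      intro m hlen _ _ _ _
      have : m = [] := List.eq_nil_of_length_eq_zero (Nat.le_zero.mp hlen)
      subst this; rfl
  | succ N ih =>
      intro m hlen hpw hmem hidem hlt
      cases m with
      | nil => rfl
      | cons t0 rest =>
          have hpw' := (List.pairwise_cons.mp hpw)
          have hf0 : f t0 = t0 := by
            by_cases h0 : f t0 = t0
            · exact h0
            · have h1 : f t0 ∈ t0 :: rest := hmem t0 (by simp)
              have h2 : f t0 ∈ rest := by
                rcases List.mem_cons.mp h1 with h | h
                · exact absurd h h0
                · exact h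
              exact absurd (hpw'.1 _ h2) (fun hr => hasym _ _ (hlt t0 (by simp) h0) hr)
          have ht0rest : t0 ∉ rest := by
            intro hmem0
            exact hasym t0 t0 (hpw'.1 _ hmem0) (hpw'.1 _ hmem0)
          -- left side
          have hmap : (t0 :: rest).map f = f t0 :: rest.map f := rfl
          rw [hmap, hf0, pvDedup_cons]
          have hswap : (rest.map f).filter (fun y => y != t0)
              = (rest.filter (fun t => f t != t0)).map f := by
            rw [List.filter_map]; rfl
          rw [hswap]
          set m2 := rest.filter (fun t => f t != t0) with hm2
          have hm2sub : ∀ t ∈ m2, t ∈ rest := fun t ht => (List.mem_filter.mp ht).1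
          have hm2len : m2.length ≤ N := by
            have : m2.length ≤ rest.length := List.length_filter_le _ _
            have hr : rest.length ≤ N := by simpa using Nat.succ_le_succ_iff.mp hlen
            omega
          have hm2pw : m2.Pairwise r := hpw'.2.sublist (List.filter_sublist (l := rest))
          have hm2mem : ∀ t ∈ m2, f t ∈ m2 := by
            intro t ht
            have htr := hm2sub t ht
            have hftne : (f t != t0) = true := (List.mem_filter.mp ht).2
            have hft : f t ∈ t0 :: rest := hmem t (by simp [htr])
            have hftne' : f t ≠ t0 := by simpa using hftne
            have hftrest : f t ∈ rest := by
              rcases List.mem_cons.mp hft with h | h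
              · exact absurd h hftne'
              · exact h
            refine List.mem_filter.mpr ⟨hftrest, ?_⟩
            rw [hidem t (by simp [htr])]
            exact hftne
          have hm2idem : ∀ t ∈ m2, f (f t) = f t := fun t ht => hidem t (by simp [hm2sub t ht])
          have hm2lt : ∀ t ∈ m2, f t ≠ t → r (f t) t := fun t ht => hlt t (by simp [hm2sub t ht])
          rw [ih m2 hm2len hm2pw hm2mem hm2idem hm2lt]
          -- right side
          have hrhs : (t0 :: rest).filter (fun t => f t == t)
              = t0 :: rest.filter (fun t => f t == t) := by
            simp [List.filter_cons, hf0]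
          rw [hrhs]
          congr 1
          rw [hm2, List.filter_filter]
          apply List.filter_congr
          intro t htr
          by_cases hft : f t = t
          · have htne : t ≠ t0 := by
              intro h; subst h; exact ht0rest htr
            simp [hft, htne]
          · simp [hft]

lemma pvFoldl_update {α β : Type} [BEq β] (g : α → List β) :
    ∀ (l : List α) (s : PySem.Set β),
      l.foldl (fun s x => PySem.Set.update s (g x)) s = PySem.Set.update s (l.flatMap g) := by
  intro l
  induction l with
  | nil => intro s; rfl
  | cons x l ih =>
      intro s
      simp only [List.foldl_cons, List.flatMap_cons]
      rw [ih]
      simp [PySem.Set.update, List.foldl_append]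

lemma pvFoldAdd {α β : Type} [BEq β] (g : α → Bool) (h : α → β) :
    ∀ (l : List α) (s : PySem.Set β),
      l.foldl (fun s t => if g t then PySem.Set.add s (h t) else s) s
        = PySem.Set.update s ((l.filter g).map h) := by
  intro l
  induction l with
  | nil => intro s; rfl
  | cons x l ih =>
      intro s
      simp only [List.foldl_cons, List.filter_cons]
      by_cases hx : g x
      · simp only [hx, if_true]
        rw [ih]
        simp [PySem.Set.update]
      · simp only [hx]
        simp only [Bool.false_eq_true, if_false]
        rw [ih]

-- ---------- A-side ----------
-- the min/index/slice expression computes the min-first rotation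
lemma pvBodyA (s : PySem.Set (Int × Int × Int)) (i j k : Int)
    (hij : ¬ j = i) (hik : ¬ k = i) (hjk : ¬ k = j) :
    (let c : List Int := [i, j, k]
     let min_idx : Nat := (PySem.List.index? c ((PySem.List.min? c (fun x => x)).getD 0)).getD 0
     match PySem.List.slice c (some (min_idx : Int)) none ++
           PySem.List.slice c none (some (min_idx : Int)) with
     | [x, y, z] => PySem.Set.add s (x, y, z)
     | _ => s) = PySem.Set.add s (pvNorm (i, j, k)) := by
  have hfold : PySem.List.min? [i, j, k] (fun x => x) = some (min (min i j) k) := by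
    rw [PySem.List.min?_id_cons]; simp [List.foldl]
  rcases lt_trichotomy i j with h1 | h1 | h1
  · rcases lt_trichotomy i k with h2 | h2 | h2
    · -- i min
      have hmin : min (min i j) k = i := by omega
      have hidx : PySem.List.index? [i, j, k] i = some 0 := PySem.List.index?_cons_self i [j, k]
      simp only [hfold, hmin, Option.getD_some, hidx]
      rw [PySem.List.slice_from_natCast, PySem.List.slice_to_natCast]
      simp [pvNorm, h1, h2]
    · exact absurd h2.symm hik
    · -- k min (k < i < j)
      have hmin : min (min i j) k = k := by omega
      have hidx : PySem.List.index? [i, j, k] k = some 2 := by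
        rw [PySem.List.index?_cons_of_ne _ (fun h => hik h.symm),
            PySem.List.index?_cons_of_ne _ (fun h => hjk h.symm),
            PySem.List.index?_cons_self]
        rfl
      simp only [hfold, hmin, Option.getD_some, hidx]
      rw [PySem.List.slice_from_natCast, PySem.List.slice_to_natCast]
      have : pvNorm (i, j, k) = (k, i, j) := by
        simp only [pvNorm]; split_ifs <;> first | rfl | (exfalso; omega)
      simp [this]
  · exact absurd h1.symm hij
  · rcases lt_trichotomy j k with h2 | h2 | h2
    · -- j min (j < i, j < k)
      have hmin : min (min i j) k = j := by omega
      have hidx : PySem.List.index? [i, j, k] j = some 1 := by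
        rw [PySem.List.index?_cons_of_ne _ (fun h => hij h.symm), PySem.List.index?_cons_self]
        rfl
      simp only [hfold, hmin, Option.getD_some, hidx]
      rw [PySem.List.slice_from_natCast, PySem.List.slice_to_natCast]
      have : pvNorm (i, j, k) = (j, k, i) := by
        simp only [pvNorm]; split_ifs <;> first | rfl | (exfalso; omega)
      simp [this]
    · exact absurd h2.symm hjk
    · -- k min (k < j < i)
      have hmin : min (min i j) k = k := by omega
      have hidx : PySem.List.index? [i, j, k] k = some 2 := by
        rw [PySem.List.index?_cons_of_ne _ (fun h => hik h.symm),
            PySem.List.index?_cons_of_ne _ (fun h => hjk h.symm),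
            PySem.List.index?_cons_self]
        rfl
      simp only [hfold, hmin, Option.getD_some, hidx]
      rw [PySem.List.slice_from_natCast, PySem.List.slice_to_natCast]
      have : pvNorm (i, j, k) = (k, i, j) := by
        simp only [pvNorm]; split_ifs <;> first | rfl | (exfalso; omega)
      simp [this]


def pvLAflat (A : List (List Int)) (n : Int) : List (Int × Int × Int) :=
  (PySem.List.pyRange 0 n 1).flatMap (fun i =>
    (PySem.List.pyRange 0 n 1).flatMap (fun j =>
      if !(j == i) && pvE A i j then
        ((PySem.List.pyRange 0 n 1).filter (pvKfilt A i j)).map (fun k => pvNorm (i, j, k))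
      else []))

lemma pvLemA (A : List (List Int)) (n : Int) :
    find_directed_3cycles A n = PySem.Set.ofList (pvLAflat A n) := by
  simp only [find_directed_3cycles]
  have hF : (fun (s : PySem.Set (Int × Int × Int)) (i : Int) =>
      (PySem.List.pyRange 0 n 1).foldl (fun s j =>
        if j == i || PySem.List.pyGetD (PySem.List.pyGetD A i []) j 0 == 0 then s
        else
          (PySem.List.pyRange 0 n 1).foldl (fun s k =>
            if k == i || k == j || PySem.List.pyGetD (PySem.List.pyGetD A j []) k 0 == 0 then s
            else if PySem.List.pyGetD (PySem.List.pyGetD A k []) i 0 != 0 then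
              let c : List Int := [i, j, k]
              let min_idx : Nat := (PySem.List.index? c ((PySem.List.min? c (fun x => x)).getD 0)).getD 0
              match PySem.List.slice c (some (min_idx : Int)) none ++
                    PySem.List.slice c none (some (min_idx : Int)) with
              | [x, y, z] => PySem.Set.add s (x, y, z)
              | _ => s
            else s) s) s)
      = (fun s i => PySem.Set.update s ((PySem.List.pyRange 0 n 1).flatMap (fun j =>
          if !(j == i) && pvE A i j then
            ((PySem.List.pyRange 0 n 1).filter (pvKfilt A i j)).map (fun k => pvNorm (i, j, k))
          else []))) := by
    funext s i
    have hJ : (fun (s : PySem.Set (Int × Int × Int)) (j : Int) =>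
        if j == i || PySem.List.pyGetD (PySem.List.pyGetD A i []) j 0 == 0 then s
        else
          (PySem.List.pyRange 0 n 1).foldl (fun s k =>
            if k == i || k == j || PySem.List.pyGetD (PySem.List.pyGetD A j []) k 0 == 0 then s
            else if PySem.List.pyGetD (PySem.List.pyGetD A k []) i 0 != 0 then
              let c : List Int := [i, j, k]
              let min_idx : Nat := (PySem.List.index? c ((PySem.List.min? c (fun x => x)).getD 0)).getD 0
              match PySem.List.slice c (some (min_idx : Int)) none ++
                    PySem.List.slice c none (some (min_idx : Int)) with
              | [x, y, z] => PySem.Set.add s (x, y, z)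
              | _ => s
            else s) s)
        = (fun s j => PySem.Set.update s (if !(j == i) && pvE A i j then
            ((PySem.List.pyRange 0 n 1).filter (pvKfilt A i j)).map (fun k => pvNorm (i, j, k))
          else [])) := by
      funext s j
      by_cases hji : j == i
      · simp [hji, PySem.Set.update]
      · by_cases hEij : PySem.List.pyGetD (PySem.List.pyGetD A i []) j 0 == 0
        · have : pvE A i j = false := by simp [pvE, bne, hEij]
          simp [hji, hEij, this, PySem.Set.update]
        · have hEij' : pvE A i j = true := by simp [pvE, bne, hEij]
          have hK : (fun (s : PySem.Set (Int × Int × Int)) (k : Int) =>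
              if k == i || k == j || PySem.List.pyGetD (PySem.List.pyGetD A j []) k 0 == 0 then s
              else if PySem.List.pyGetD (PySem.List.pyGetD A k []) i 0 != 0 then
                let c : List Int := [i, j, k]
                let min_idx : Nat := (PySem.List.index? c ((PySem.List.min? c (fun x => x)).getD 0)).getD 0
                match PySem.List.slice c (some (min_idx : Int)) none ++
                      PySem.List.slice c none (some (min_idx : Int)) with
                | [x, y, z] => PySem.Set.add s (x, y, z)
                | _ => s
              else s)
              = (fun s k => if pvKfilt A i j k then PySem.Set.add s (pvNorm (i, j, k)) else s) := by
            funext s k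
            by_cases hki : k == i
            · have : pvKfilt A i j k = false := by simp [pvKfilt, hki]
              simp [hki, this]
            · by_cases hkj : k == j
              · have : pvKfilt A i j k = false := by simp [pvKfilt, hki, hkj]
                simp [hki, hkj, this]
              · by_cases hEjk : PySem.List.pyGetD (PySem.List.pyGetD A j []) k 0 == 0
                · have : pvKfilt A i j k = false := by simp [pvKfilt, pvE, bne, hEjk]
                  simp [hki, hkj, hEjk, this]
                · by_cases hEki : PySem.List.pyGetD (PySem.List.pyGetD A k []) i 0 != 0
                  · have hkf : pvKfilt A i j k = true := by
                      simp only [pvKfilt, pvE, hEki, Bool.and_true]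
                      simp [bne, hki, hkj, hEjk]
                    rw [if_neg (by simp [hki, hkj, hEjk]), if_pos hEki, if_pos hkf]
                    exact pvBodyA s i j k (by simpa using hji) (by simpa using hki) (by simpa using hkj)
                  · have hE2 : (PySem.List.pyGetD (PySem.List.pyGetD A k []) i 0 != 0) = false := by
                      simpa using hEki
                    have hkf : pvKfilt A i j k = false := by
                      simp [pvKfilt, pvE, hE2]
                    rw [if_neg (by simp [hki, hkj, hEjk]), if_neg (by simp [hE2]), if_neg (by simp [hkf])]
          rw [if_neg (by simp [hji, hEij])]
          rw [hK, pvFoldAdd]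
          rw [if_pos (by simp [hji, hEij'])]
    rw [hJ, pvFoldl_update]
  rw [hF, pvFoldl_update]
  rfl

lemma pvLAflat_eq (A : List (List Int)) (n : Int) : pvLAflat A n = pvLA A n := by
  unfold pvLAflat pvLA pvT
  rw [List.filter_flatMap, List.map_flatMap]
  congr 1
  funext i
  rw [List.filter_flatMap, List.map_flatMap]
  congr 1
  funext j
  rw [List.filter_map, List.map_map]
  by_cases hc : (!(j == i) && pvE A i j) = true
  · rw [if_pos hc]
    have : ((PySem.List.pyRange 0 n 1).filter (pvGuard A ∘ fun k => (i, j, k)))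
        = ((PySem.List.pyRange 0 n 1).filter (pvKfilt A i j)) := by
      apply List.filter_congr
      intro k _
      simp [Function.comp, pvGuard, hc]
    rw [this]
    rfl
  · rw [if_neg hc]
    have hres : ((PySem.List.pyRange 0 n 1).filter (pvGuard A ∘ fun k => (i, j, k))) = [] := by
      rw [List.filter_eq_nil_iff]
      intro k _
      intro hh
      have hh' : ((!(j == i) && pvE A i j) && pvKfilt A i j k) = true := hh
      exact hc (by
        simp only [Bool.and_eq_true] at hh'
        simp only [Bool.and_eq_true]
        exact hh'.1)
    rw [hres]
    rfl

lemma pvFlatMap_congr {α β : Type} {l : List α} {f g : α → List β}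
    (h : ∀ x ∈ l, f x = g x) : l.flatMap f = l.flatMap g := by
  induction l with
  | nil => rfl
  | cons x l ih =>
      simp only [List.flatMap_cons]
      rw [h x (by simp), ih (fun y hy => h y (by simp [hy]))]

-- ---------- B-side ----------
def pvLBflat (A : List (List Int)) (n : Int) : List (Int × Int × Int) :=
  (PySem.List.pyRange 0 n 1).flatMap (fun a =>
    (PySem.List.pyRange (a + 1) n 1).flatMap (fun b =>
      if pvE A a b then
        ((PySem.List.pyRange (a + 1) n 1).filter
          (fun c => c != b && pvE A b c && pvE A c a)).map (fun c => (a, b, c))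
      else []))

lemma pvLemB (A : List (List Int)) (n : Int) :
    find_directed_3cycles_alt A n = pvLBflat A n := by
  simp only [find_directed_3cycles_alt]
  have hF : (fun (acc : List (Int × Int × Int)) (a : Int) =>
      (PySem.List.pyRange (a + 1) n 1).foldl (fun acc b =>
        if PySem.List.pyGetD (PySem.List.pyGetD A a []) b 0 == 0 then acc
        else
          (PySem.List.pyRange (a + 1) n 1).foldl (fun acc c =>
            if c != b && PySem.List.pyGetD (PySem.List.pyGetD A b []) c 0 != 0 &&
                PySem.List.pyGetD (PySem.List.pyGetD A c []) a 0 != 0 then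
              acc ++ [(a, b, c)]
            else acc) acc) acc)
      = (fun acc a => acc ++ (PySem.List.pyRange (a + 1) n 1).flatMap (fun b =>
          if pvE A a b then
            ((PySem.List.pyRange (a + 1) n 1).filter
              (fun c => c != b && pvE A b c && pvE A c a)).map (fun c => (a, b, c))
          else [])) := by
    funext acc a
    have hB : (fun (acc : List (Int × Int × Int)) (b : Int) =>
        if PySem.List.pyGetD (PySem.List.pyGetD A a []) b 0 == 0 then acc
        else
          (PySem.List.pyRange (a + 1) n 1).foldl (fun acc c =>
            if c != b && PySem.List.pyGetD (PySem.List.pyGetD A b []) c 0 != 0 &&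
                PySem.List.pyGetD (PySem.List.pyGetD A c []) a 0 != 0 then
              acc ++ [(a, b, c)]
            else acc) acc)
        = (fun acc b => acc ++ (if pvE A a b then
            ((PySem.List.pyRange (a + 1) n 1).filter
              (fun c => c != b && pvE A b c && pvE A c a)).map (fun c => (a, b, c))
          else [])) := by
      funext acc b
      by_cases hab : PySem.List.pyGetD (PySem.List.pyGetD A a []) b 0 == 0
      · have : pvE A a b = false := by simp [pvE, bne, hab]
        simp [hab, this]
      · have hab' : pvE A a b = true := by simp [pvE, bne, hab]
        rw [if_neg (by simpa using hab), if_pos hab']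
        have := PySem.List.foldl_append_if
          (fun c => c != b && pvE A b c && pvE A c a)
          (fun c => ((a, b, c) : Int × Int × Int))
          (PySem.List.pyRange (a + 1) n 1) acc
        simpa [pvE] using this
    rw [hB, PySem.List.foldl_append_eq_flatMap]
  rw [hF, PySem.List.foldl_append_eq_flatMap]
  rfl

lemma pvLBflat_eq (A : List (List Int)) (n : Int) : pvLBflat A n = pvLB A n := by
  unfold pvLBflat pvLB pvT
  rw [List.filter_flatMap]
  apply pvFlatMap_congr
  intro a ha
  symm
  have ha' : 0 ≤ a ∧ a < n := PySem.List.mem_pyRange_one.mp ha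
  rw [List.filter_flatMap]
  have hstep : ∀ j : Int, List.filter
        (fun t => pvGuard A t && decide (t.1 < t.2.1) && decide (t.1 < t.2.2))
        (List.map (fun k => (a, j, k)) (PySem.List.pyRange 0 n 1))
      = List.map (fun k => ((a, j, k) : Int × Int × Int))
          (List.filter (fun k => pvGuard A (a, j, k) && decide (a < j) && decide (a < k))
            (PySem.List.pyRange 0 n 1)) := by
    intro j
    rw [List.filter_map]
    rfl
  have hsplit := PySem.List.pyRange_one_append 0 (a + 1) n (by omega) (by omega)
  have houter : ∀ (f : Int → List (Int × Int × Int)),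
      (∀ j ∈ PySem.List.pyRange 0 (a + 1) 1, f j = []) →
      (PySem.List.pyRange 0 n 1).flatMap f = (PySem.List.pyRange (a + 1) n 1).flatMap f := by
    intro f hf
    rw [hsplit, List.flatMap_append]
    have hnil : (PySem.List.pyRange 0 (a + 1) 1).flatMap f = [] := by
      rw [List.flatMap_eq_nil_iff]
      exact hf
    rw [hnil, List.nil_append]
  rw [houter _ (by
    intro j hj
    have hja : j ≤ a := by
      have := PySem.List.mem_pyRange_one.mp hj; omega
    rw [hstep j]
    have hfe : List.filter (fun k => pvGuard A (a, j, k) && decide (a < j) && decide (a < k))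
        (PySem.List.pyRange 0 n 1) = [] := by
      rw [List.filter_eq_nil_iff]
      intro k _
      have hd : decide (a < j) = false := by simp; omega
      simp [hd]
    rw [hfe]; rfl)]
  apply pvFlatMap_congr
  intro b hb
  have hb' : a + 1 ≤ b ∧ b < n := PySem.List.mem_pyRange_one.mp hb
  rw [hstep b]
  by_cases hE : pvE A a b
  · rw [if_pos hE]
    have hfilter : List.filter (fun k => pvGuard A (a, b, k) && decide (a < b) && decide (a < k))
        (PySem.List.pyRange 0 n 1)
        = List.filter (fun c => c != b && pvE A b c && pvE A c a)
            (PySem.List.pyRange (a + 1) n 1) := by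
      conv_lhs => rw [hsplit]
      rw [List.filter_append]
      have h1 : List.filter (fun k => pvGuard A (a, b, k) && decide (a < b) && decide (a < k))
          (PySem.List.pyRange 0 (a + 1) 1) = [] := by
        rw [List.filter_eq_nil_iff]
        intro k hk
        have : k ≤ a := by have := PySem.List.mem_pyRange_one.mp hk; omega
        have hd : decide (a < k) = false := by simp; omega
        simp [hd]
      rw [h1, List.nil_append]
      apply List.filter_congr
      intro k hk
      have hk' : a + 1 ≤ k ∧ k < n := PySem.List.mem_pyRange_one.mp hk
      have hba : (b == a) = false := by simp; omega
      have hka : (k == a) = false := by simp; omega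
      have hab : decide (a < b) = true := by simp; omega
      have hak : decide (a < k) = true := by simp; omega
      simp only [pvGuard, pvKfilt, hba, hka, hE, hab, hak]
      cases pvE A b k <;> cases pvE A k a <;> cases hkb : k == b <;> simp [bne, hkb]
    rw [hfilter]
  · rw [if_neg hE]
    have : List.filter (fun k => pvGuard A (a, b, k) && decide (a < b) && decide (a < k))
        (PySem.List.pyRange 0 n 1) = [] := by
      rw [List.filter_eq_nil_iff]
      intro k _
      have hEf : pvE A a b = false := by simpa using hE
      simp [pvGuard, hEf]
    rw [this]; rfl

-- ---------- combinatorics ----------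
lemma pvT_pairwise (n : Int) : (pvT n).Pairwise pvLt3 := by
  unfold pvT
  rw [List.pairwise_flatMap]
  constructor
  · intro i _
    rw [List.pairwise_flatMap]
    constructor
    · intro j _
      rw [List.pairwise_map]
      exact (PySem.List.pairwise_lt_pyRange_one 0 n).imp (fun h => Or.inr ⟨rfl, Or.inr ⟨rfl, h⟩⟩)
    · refine (PySem.List.pairwise_lt_pyRange_one 0 n).imp ?_
      intro j j' hjj x hx y hy
      simp only [List.mem_map] at hx hy
      obtain ⟨k, _, rfl⟩ := hx
      obtain ⟨k', _, rfl⟩ := hy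
      exact Or.inr ⟨rfl, Or.inl hjj⟩
  · refine (PySem.List.pairwise_lt_pyRange_one 0 n).imp ?_
    intro i i' hii x hx y hy
    simp only [List.mem_flatMap, List.mem_map] at hx hy
    obtain ⟨j, _, k, _, rfl⟩ := hx
    obtain ⟨j', _, k', _, rfl⟩ := hy
    exact Or.inl hii

lemma pvMem_pvT (n : Int) (t : Int × Int × Int) :
    t ∈ pvT n ↔ (0 ≤ t.1 ∧ t.1 < n) ∧ (0 ≤ t.2.1 ∧ t.2.1 < n) ∧ (0 ≤ t.2.2 ∧ t.2.2 < n) := by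
  obtain ⟨a, b, c⟩ := t
  simp [pvT, List.mem_flatMap, List.mem_map, PySem.List.mem_pyRange_one]

lemma pvGuard_distinct (A : List (List Int)) (t : Int × Int × Int) (h : pvGuard A t = true) :
    t.1 ≠ t.2.1 ∧ t.1 ≠ t.2.2 ∧ t.2.1 ≠ t.2.2 := by
  obtain ⟨a, b, c⟩ := t
  simp only [pvGuard, pvKfilt, Bool.and_eq_true, bne_iff_ne, ne_eq, Bool.not_eq_true',
    beq_eq_false_iff_ne] at h
  obtain ⟨⟨hba, hEab⟩, ⟨⟨hca, hcb⟩, hEbc⟩, hEca⟩ := h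
  exact ⟨fun hh => hba hh.symm, fun hh => hca hh.symm, fun hh => hcb hh.symm⟩

lemma pvGuard_norm (A : List (List Int)) (t : Int × Int × Int) (h : pvGuard A t = true) :
    pvGuard A (pvNorm t) = true := by
  obtain ⟨a, b, c⟩ := t
  have hd := pvGuard_distinct A (a, b, c) h
  simp only [pvGuard, pvKfilt, Bool.and_eq_true, bne_iff_ne, ne_eq, Bool.not_eq_true',
    beq_eq_false_iff_ne] at h ⊢
  simp only [pvNorm]
  split
  · exact h
  · obtain ⟨⟨hba, hEab⟩, ⟨⟨hca, hcb⟩, hEbc⟩, hEca⟩ := h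
    split
    · exact ⟨⟨fun hh => hcb hh, hEbc⟩, ⟨⟨fun hh => hba hh.symm, fun hh => hca hh.symm⟩, hEca⟩, hEab⟩
    · exact ⟨⟨fun hh => hca hh.symm, hEca⟩, ⟨⟨fun hh => hcb hh.symm, hba⟩, hEab⟩, hEbc⟩

lemma pvNorm_fix (t : Int × Int × Int) (h1 : t.1 < t.2.1) (h2 : t.1 < t.2.2) : pvNorm t = t := by
  obtain ⟨a, b, c⟩ := t
  simp only at h1 h2
  simp [pvNorm, h1, h2]

lemma pvNorm_minfirst (t : Int × Int × Int)
    (h : t.1 ≠ t.2.1 ∧ t.1 ≠ t.2.2 ∧ t.2.1 ≠ t.2.2) :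
    (pvNorm t).1 < (pvNorm t).2.1 ∧ (pvNorm t).1 < (pvNorm t).2.2 := by
  obtain ⟨a, b, c⟩ := t
  simp only at h
  simp only [pvNorm]
  split_ifs <;> simp_all <;> omega

lemma pvNorm_lt (t : Int × Int × Int) (h : t.1 ≠ t.2.1 ∧ t.1 ≠ t.2.2 ∧ t.2.1 ≠ t.2.2)
    (hne : pvNorm t ≠ t) : pvLt3 (pvNorm t) t := by
  obtain ⟨a, b, c⟩ := t
  simp only at h
  simp only [pvNorm] at hne ⊢
  unfold pvLt3
  split_ifs at hne ⊢ <;> simp_all <;> omega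

lemma pvMain (A : List (List Int)) (n : Int) :
    PySem.List.dedup (pvLA A n) = pvLB A n := by
  unfold pvLA pvLB
  have hsub : ((pvT n).filter (pvGuard A)).Sublist (pvT n) := List.filter_sublist (l := pvT n)
  have hpw : ((pvT n).filter (pvGuard A)).Pairwise pvLt3 := (pvT_pairwise n).sublist hsub
  have hmem : ∀ t ∈ (pvT n).filter (pvGuard A), pvNorm t ∈ (pvT n).filter (pvGuard A) := by
    intro t ht
    obtain ⟨htT, hg⟩ := List.mem_filter.mp ht
    refine List.mem_filter.mpr ⟨?_, pvGuard_norm A t hg⟩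
    have h1 := (pvMem_pvT n t).mp htT
    refine (pvMem_pvT n _).mpr ?_
    obtain ⟨a, b, c⟩ := t
    simp only at h1
    simp only [pvNorm]
    split_ifs <;> simp only [] <;> tauto
  have hidem : ∀ t ∈ (pvT n).filter (pvGuard A), pvNorm (pvNorm t) = pvNorm t := by
    intro t ht
    have hg := (List.mem_filter.mp ht).2
    have hd := pvGuard_distinct A t hg
    exact pvNorm_fix _ (pvNorm_minfirst t hd).1 (pvNorm_minfirst t hd).2
  have hlt : ∀ t ∈ (pvT n).filter (pvGuard A), pvNorm t ≠ t → pvLt3 (pvNorm t) t := by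
    intro t ht hne
    exact pvNorm_lt t (pvGuard_distinct A t (List.mem_filter.mp ht).2) hne
  rw [pvDedupMap pvLt3 pvLt3_asymm pvNorm ((pvT n).filter (pvGuard A)).length _ le_rfl hpw hmem hidem hlt]
  rw [List.filter_filter]
  apply List.filter_congr
  intro t htT
  by_cases hg : pvGuard A t
  · have hd := pvGuard_distinct A t hg
    by_cases hmf : t.1 < t.2.1 ∧ t.1 < t.2.2
    · have hfix := pvNorm_fix t hmf.1 hmf.2
      simp [hfix, hg, hmf.1, hmf.2]
    · have hne : pvNorm t ≠ t := by
        intro hfix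
        exact hmf ⟨by rw [← hfix]; exact (pvNorm_minfirst t hd).1,
                   by rw [← hfix]; exact (pvNorm_minfirst t hd).2⟩
      have : (pvNorm t == t) = false := beq_eq_false_iff_ne.mpr hne
      simp only [this, Bool.false_and, hg, Bool.true_and]
      rcases Decidable.not_and_iff_not_or_not.mp hmf with h | h
      · simp [h]
      · simp [h]
  · simp [hg]


-- ===== VERDICT (by name: the statement is the Claim_ definition above) =====
theorem find_directed_3cycles_spec : Claim_equal_find_directed_3cycles := by
  intro A n _ _
  unfold Spec_find_directed_3cycles
  have h1 := pvLemA A n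
  have h2 : PySem.Set.ofList (pvLAflat A n) = PySem.List.dedup (pvLA A n) := by
    rw [pvLAflat_eq]; simp [PySem.List.dedup_eq_ofList]
  rw [h1, h2, pvMain, ← pvLBflat_eq, ← pvLemB]
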